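-- pv_equiv track=rewrite | github.com/sam-flahive/dyl-encryption | dyl_0.1.py | letter_output_V
-- ===== SOURCE A (Python) =====
-- list_of_letters_V = 'r=V%i3(Luz9C/}ObkoDQ+*ePx£RyEn8Fv{):&2wG]S6K$BT^,mp0!X\'>fU|qd<ZWN.l?g7[;@MJt5Ia"#A4h1 _jscYH-~'
--
-- def letter_output_V(number, value):
--           order_of_letters = {}
--           for letter in list_of_letters_V:
--                    if value % 94 == 0:
--                             order_of_letters[94] = letter
--
--                    else:
--                             order_of_letters[value % 94] = letter
--
--                    value += 1
--           return(order_of_letters[number])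
-- ===== SOURCE B (Python) =====
-- list_of_letters_V = 'r=V%i3(Luz9C/}ObkoDQ+*ePx£RyEn8Fv{):&2wG]S6K$BT^,mp0!X\'>fU|qd<ZWN.l?g7[;@MJt5Ia"#A4h1 _jscYH-~'
--
-- def letter_output_V(number, value):
--     # A's rotating dict only ever holds the keys 1..94; anything else is a KeyError.
--     if not (1 <= number <= 94):
--         raise KeyError(number)
--     return list_of_letters_V[(number - value) % 94]
-- ===== Notes on version B (the rewrite author's own statement) =====
-- stated objective: simpler
-- what changed: B skips building the 94-entry rotating dict entirely and computes the letter index in closed form as (number - value) % 94 (the number==94 case is handled uniformly because 94 % 94 == 0), guarding the 1..94 key range that A's dict keys span.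
import Mathlib
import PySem

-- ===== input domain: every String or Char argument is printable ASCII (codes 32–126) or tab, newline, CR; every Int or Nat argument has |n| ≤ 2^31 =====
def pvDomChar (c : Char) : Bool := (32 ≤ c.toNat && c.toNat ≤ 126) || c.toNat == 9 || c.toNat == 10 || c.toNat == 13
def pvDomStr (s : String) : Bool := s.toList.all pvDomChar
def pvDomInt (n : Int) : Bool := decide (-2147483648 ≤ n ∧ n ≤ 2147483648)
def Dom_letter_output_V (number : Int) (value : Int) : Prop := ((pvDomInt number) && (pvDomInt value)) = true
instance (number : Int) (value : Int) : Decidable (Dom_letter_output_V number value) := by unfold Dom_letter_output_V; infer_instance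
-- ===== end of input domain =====

-- B replaces A's 94-entry rotating dict with the closed-form index (number - value) % 94; return values proved equal on 1 ≤ number ≤ 94 (outside, both Pythons raise KeyError).

-- ===== PORT A =====
def lolV : String := "r=V%i3(Luz9C/}ObkoDQ+*ePx£RyEn8Fv{):&2wG]S6K$BT^,mp0!X'>fU|qd<ZWN.l?g7[;@MJt5Ia\"#A4h1 _jscYH-~"

-- one loop body of A: insert this letter at key value%94 (or 94 when that is 0), then value += 1
def dylStep (st : PySem.Dict Int Char × Int) (letter : Char) : PySem.Dict Int Char × Int :=
  (if PySem.Int.mod st.2 94 = 0 then st.1.insert 94 letter else st.1.insert (PySem.Int.mod st.2 94) letter,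
   st.2 + 1)

def letter_output_V (number : Int) (value : Int) : String :=
  match ((lolV.toList.foldl dylStep (PySem.Dict.empty, value)).1).get? number with
  | some c => String.ofList [c]    -- Python's letter is a 1-char str
  | none => ""                 -- KeyError: excluded by Pre_

-- ===== PORT B =====
def letter_output_V_alt (number : Int) (value : Int) : String :=
  if 1 ≤ number ∧ number ≤ 94 then
    match PySem.Str.pyGet? lolV (PySem.Int.mod (number - value) 94) with
    | some c => String.ofList [c]
    | none => ""               -- unreachable: the index is in [0, 94)
  else ""                      -- Source B raises KeyError here: excluded by Pre_

-- ===== PRECONDITION & SPEC =====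
-- A returns normally exactly when number is one of the dict's keys 1..94; everywhere else A raises KeyError (and so does B).
def Pre_letter_output_V (number : Int) (value : Int) : Prop := 1 ≤ number ∧ number ≤ 94
instance (number : Int) (value : Int) : Decidable (Pre_letter_output_V number value) := by unfold Pre_letter_output_V; infer_instance
def pvWitness_letter_output_V : Int × Int := (5, 7)

def Spec_letter_output_V (number : Int) (value : Int) (out : String) : Prop := out = letter_output_V_alt number value
instance (number : Int) (value : Int) (out : String) : Decidable (Spec_letter_output_V number value out) := by unfold Spec_letter_output_V; infer_instance

-- ===== CLAIM (what is proved, stated in full; the proofs are below) =====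
def Claim_equal_letter_output_V : Prop := ∀ (number : Int) (value : Int), Dom_letter_output_V number value → Pre_letter_output_V number value → Spec_letter_output_V number value (letter_output_V number value)

-- ===== LEMMAS AND PROOFS =====

-- the key A's loop body inserts at when the running counter is v
def dylKey (v : Int) : Int := if PySem.Int.mod v 94 = 0 then 94 else PySem.Int.mod v 94

theorem dylStep_eq (d : PySem.Dict Int Char) (v : Int) (c : Char) :
    dylStep (d, v) c = (d.insert (dylKey v) c, v + 1) := by
  unfold dylStep dylKey
  dsimp only
  split_ifs <;> rfl

-- frame: a fold that never inserts at k leaves get? k unchanged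
theorem fold_frame (cs : List Char) (d : PySem.Dict Int Char) (v k : Int)
    (h : ∀ i : Nat, i < cs.length → dylKey (v + i) ≠ k) :
    ((cs.foldl dylStep (d, v)).1).get? k = d.get? k := by
  induction cs generalizing d v with
  | nil => rfl
  | cons c cs ih =>
      rw [List.foldl_cons, dylStep_eq]
      rw [ih (d.insert (dylKey v) c) (v + 1) (fun i hi => by
        have := h (i + 1) (by simpa using Nat.succ_lt_succ hi)
        simpa [add_assoc, add_comm, add_left_comm] using this)]
      exact PySem.Dict.get?_insert_of_ne d c (fun hkk => (h 0 (by simp)) (by simpa using hkk.symm))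

-- hit: when exactly one position i of the fold inserts at k, get? k is that letter
theorem fold_hit (cs : List Char) (d : PySem.Dict Int Char) (v k : Int) (i : Nat)
    (hi : i < cs.length) (hk : dylKey (v + i) = k)
    (huniq : ∀ j : Nat, j < cs.length → dylKey (v + j) = k → j = i) :
    ((cs.foldl dylStep (d, v)).1).get? k = some cs[i] := by
  induction cs generalizing d v i with
  | nil => exact absurd hi (Nat.not_lt_zero i)
  | cons c cs ih =>
      rw [List.foldl_cons, dylStep_eq]
      cases i with
      | zero =>
          simp only [Nat.cast_zero, add_zero] at hk
          rw [hk]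
          rw [fold_frame cs (d.insert k c) (v + 1) k (fun j hj hcon => by
            have := huniq (j + 1) (by simpa using Nat.succ_lt_succ hj)
              (by simpa [add_assoc, add_comm, add_left_comm] using hcon)
            exact Nat.succ_ne_zero j this)]
          exact PySem.Dict.get?_insert_self d k c
      | succ n =>
          have hn : n < cs.length := by simpa using Nat.lt_of_succ_lt_succ hi
          have hk' : dylKey (v + 1 + n) = k := by
            have : (v : Int) + (n + 1 : Nat) = v + 1 + n := by push_cast; ring
            rwa [this] at hk
          have hu' : ∀ j : Nat, j < cs.length → dylKey (v + 1 + j) = k → j = n := by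
            intro j hj hcon
            have := huniq (j + 1) (by simpa using Nat.succ_lt_succ hj)
              (by rwa [show (v : Int) + (j + 1 : Nat) = v + 1 + j by push_cast; ring])
            omega
          simpa using ih (d.insert (dylKey v) c) (v + 1) n hn hk' hu'

theorem lolV_len : lolV.toList.length = 94 := by decide

-- ===== VERDICT (by name: the statement is the Claim_ definition above) =====
theorem letter_output_V_spec : Claim_equal_letter_output_V := by
  intro number value _ hpre
  obtain ⟨h1, h2⟩ := hpre
  unfold Spec_letter_output_V letter_output_V letter_output_V_alt
  rw [if_pos ⟨h1, h2⟩]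
  set p : Int := PySem.Int.mod (number - value) 94 with hp
  have hp0 : 0 ≤ p := PySem.Int.mod_nonneg _ (by norm_num)
  have hp94 : p < 94 := PySem.Int.mod_lt _ (by norm_num)
  have hpe : p = (number - value) % 94 := by
    rw [hp, PySem.Int.mod_eq_emod_of_pos (by norm_num)]
  set i : Nat := p.toNat with hi
  have hip : (i : Int) = p := Int.toNat_of_nonneg hp0
  have hilen : i < lolV.toList.length := by rw [lolV_len]; omega
  have hkey : dylKey (value + i) = number := by
    unfold dylKey
    rw [PySem.Int.mod_eq_emod_of_pos (by norm_num)]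
    split_ifs with h <;> omega
  have huniq : ∀ j : Nat, j < lolV.toList.length → dylKey (value + j) = number → j = i := by
    intro j hj hcon
    rw [lolV_len] at hj
    unfold dylKey at hcon
    rw [PySem.Int.mod_eq_emod_of_pos (by norm_num)] at hcon
    split_ifs at hcon <;> omega
  have hget := fold_hit lolV.toList PySem.Dict.empty value number i hilen hkey huniq
  rw [hget]
  have : PySem.Str.pyGet? lolV p = some lolV.toList[i] := by
    rw [← hip, PySem.Str.pyGet?_natCast, List.getElem?_eq_getElem hilen]
  rw [this]
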